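-- pv_equiv track=rewrite | github.com/De7vID/klingon-assistant-data | build/definition_parser.py | tokenize_with_parens
-- ===== SOURCE A (Python) =====
-- from typing import List, Optional, Tuple
--
-- def tokenize_with_parens(text: str) -> List[Tuple[str, bool]]:
--     """
--     Tokenize text, tracking whether each token is inside parentheses.
--     Returns list of (token, is_inside_parens) tuples.
--     """
--     tokens = []
--     current = ""
--     depth = 0
--
--     for char in text:
--         if char == '(':
--             if current and depth == 0:
--                 tokens.append((current, False))
--                 current = ""
--             current += char
--             depth += 1
--         elif char == ')':
--             current += char
--             depth -= 1
--             if depth == 0: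
--                 tokens.append((current, True))
--                 current = ""
--         else:
--             current += char
--
--     if current:
--         tokens.append((current, depth > 0))
--
--     return tokens
-- ===== SOURCE B (Python) =====
-- from itertools import groupby
-- from typing import List, Tuple
--
-- def tokenize_with_parens(text: str) -> List[Tuple[str, bool]]:
--     """
--     Tokenize text, tracking whether each token is inside parentheses.
--     Two-pass: label each character with a token id, then group-and-join;
--     a token is 'inside parens' exactly when it begins with '('.
--     """
--     labeled = []
--     tid = 0
--     depth = 0
--     brk = False
--     for ch in text:
--         if (brk or (ch == '(' and depth == 0)) and labeled:
--             tid += 1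
--         brk = False
--         labeled.append((tid, ch))
--         if ch == '(':
--             depth += 1
--         elif ch == ')':
--             depth -= 1
--             brk = depth == 0
--     result = []
--     for _, grp in groupby(labeled, key=lambda p: p[0]):
--         tok = ''.join(ch for _, ch in grp)
--         result.append((tok, tok[0] == '('))
--     return result
-- ===== Notes on version B (the rewrite author's own statement) =====
-- stated objective: alternative
-- what changed: Replaces inline string accumulation with state flushes by a two-pass scheme: first label every character with a token id (bumping the id at depth-0 '(' and after a depth-0-closing ')'), then groupby the labels and join each run, deriving the inside-parens flag from whether the token starts with '(' instead of from loop state.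
import Mathlib
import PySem

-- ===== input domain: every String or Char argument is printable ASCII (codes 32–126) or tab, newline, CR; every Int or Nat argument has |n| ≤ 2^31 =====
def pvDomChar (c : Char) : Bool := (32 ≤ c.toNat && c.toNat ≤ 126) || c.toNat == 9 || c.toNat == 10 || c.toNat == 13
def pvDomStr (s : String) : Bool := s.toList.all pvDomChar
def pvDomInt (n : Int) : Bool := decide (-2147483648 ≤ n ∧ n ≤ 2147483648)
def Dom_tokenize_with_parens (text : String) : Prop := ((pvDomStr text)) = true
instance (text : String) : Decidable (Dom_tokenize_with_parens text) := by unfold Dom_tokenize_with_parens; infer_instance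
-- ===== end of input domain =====

-- B replaces A's inline accumulate-and-flush loop by a two-pass label-then-groupby
-- scheme (objective: alternative decomposition, same cost); return values proved equal.

-- ===== PORT A =====
-- the body of A's for-loop, one character at a time; state = (tokens, current, depth);
-- Python's string `current` is ported as a List Char, joined by String.mk on flush
def pvStepA (st : List (String × Bool) × List Char × Int) (c : Char) :
    List (String × Bool) × List Char × Int :=
  let tokens := st.1
  let current := st.2.1
  let depth := st.2.2
  if c = '(' then
    let p := if current ≠ [] ∧ depth = 0 then (tokens ++ [(String.mk current, false)], ([] : List Char)) else (tokens, current)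
    (p.1, p.2 ++ [c], depth + 1)
  else if c = ')' then
    let current := current ++ [c]
    let depth := depth - 1
    if depth = 0 then (tokens ++ [(String.mk current, true)], [], depth)
    else (tokens, current, depth)
  else (tokens, current ++ [c], depth)

def tokenize_with_parens (text : String) : List (String × Bool) :=
  let r := text.toList.foldl pvStepA ([], [], 0)
  r.1 ++ (if r.2.1 ≠ [] then [(String.mk r.2.1, decide (0 < r.2.2))] else [])

-- ===== PORT B =====
-- first pass of Source B: label each character with its token id; `nonempty` is the
-- truthiness of the growing `labeled` list (true iff a character was already emitted)
def pvPass1 : List Char → Bool → Int → Int → Bool → List (Int × Char)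
  | [], _, _, _, _ => []
  | c :: rest, nonempty, tid, depth, brk =>
    let tid := if (brk || (c == '(' && depth == 0)) && nonempty then tid + 1 else tid
    let depth := if c == '(' then depth + 1 else if c == ')' then depth - 1 else depth
    let brk := c == ')' && depth == 0
    (tid, c) :: pvPass1 rest true tid depth brk

-- second pass of Source B: itertools.groupby by the label (runs of equal token ids)
def pvGroups : List (Int × Char) → List (List Char)
  | [] => []
  | (i, c) :: rest =>
    (c :: (rest.takeWhile (fun p => p.1 == i)).map Prod.snd)
      :: pvGroups (rest.dropWhile (fun p => p.1 == i))
  termination_by l => l.length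
  decreasing_by
    simp only [List.length_cons]
    exact Nat.lt_succ_of_le (List.length_dropWhile_le _ _)

def tokenize_with_parens_alt (text : String) : List (String × Bool) :=
  (pvGroups (pvPass1 text.toList false 0 0 false)).map
    (fun g => (String.mk g, decide (g.head? = some '(')))

-- ===== PRECONDITION & SPEC =====
def Spec_tokenize_with_parens (text : String) (out : List (String × Bool)) : Prop := out = tokenize_with_parens_alt text
instance (text : String) (out : List (String × Bool)) : Decidable (Spec_tokenize_with_parens text out) := by unfold Spec_tokenize_with_parens; infer_instance

-- ===== CLAIM (what is proved, stated in full; the proofs are below) =====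
def Claim_equal_tokenize_with_parens : Prop := ∀ (text : String), Dom_tokenize_with_parens text → Spec_tokenize_with_parens text (tokenize_with_parens text)

-- ===== LEMMAS AND PROOFS =====

def pvConsMerge (cur : List Char) : List (List Char) → List (List Char)
  | [] => [cur]
  | g :: gs => (cur ++ g) :: gs

lemma pvKey (cs : List Char) (t d : Int) (brk : Bool) (c : Char) :
    pvGroups ((t, c) :: pvPass1 cs true t d brk) =
      (if (match cs with | [] => false | c1 :: _ => brk || (c1 == '(' && d == 0)) = true
       then ([c] : List Char) :: pvGroups (pvPass1 cs true t d brk)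
       else pvConsMerge [c] (pvGroups (pvPass1 cs true t d brk))) := by
  cases cs with
  | nil => simp [pvPass1, pvGroups, pvConsMerge]
  | cons c1 cs' =>
    simp only [pvPass1]
    by_cases hb : (brk || (c1 == '(' && d == 0)) = true
    · have ht : ((t + 1 : Int) == t) = false := by simp
      simp [hb, pvGroups, ht]
    · have hb' : (brk || (c1 == '(' && d == 0)) = false := by simpa using hb
      simp [hb', pvGroups, pvConsMerge]


def pvFlag (g : List Char) : String × Bool := (String.mk g, decide (g.head? = some '('))

def pvF : List Char → List Char → Int → List (String × Bool)
  | [], cur, _ => if cur = [] then [] else [pvFlag cur]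
  | c :: cs, cur, d =>
    if c = '(' then
      if cur ≠ [] ∧ d = 0 then pvFlag cur :: pvF cs [c] (d + 1)
      else pvF cs (cur ++ [c]) (d + 1)
    else if c = ')' then
      if d - 1 = 0 then pvFlag (cur ++ [c]) :: pvF cs [] (d - 1)
      else pvF cs (cur ++ [c]) (d - 1)
    else pvF cs (cur ++ [c]) d


def pvBumpFirst (cs : List Char) (d : Int) : Bool :=
  match cs with
  | [] => false
  | c :: _ => c == '(' && d == 0

def pvMerge1 (cur : List Char) (cs : List Char) (d : Int) (gs : List (List Char)) : List (List Char) :=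
  if cur = [] then gs
  else if pvBumpFirst cs d then cur :: gs
  else pvConsMerge cur gs

lemma pvKeyF (cs : List Char) (t d : Int) (c : Char) :
    pvGroups ((t, c) :: pvPass1 cs true t d false) =
      pvMerge1 [c] cs d (pvGroups (pvPass1 cs true t d false)) := by
  rw [pvKey]
  cases cs with
  | nil => simp [pvMerge1, pvBumpFirst]
  | cons c1 cs' => simp [pvMerge1, pvBumpFirst]

lemma pvKeyT (cs : List Char) (t d : Int) (c : Char) :
    pvGroups ((t, c) :: pvPass1 cs true t d true) =
      [c] :: pvGroups (pvPass1 cs true t d true) := by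
  rw [pvKey]
  cases cs with
  | nil => simp [pvPass1, pvGroups, pvConsMerge]
  | cons c1 cs' => simp

lemma pvMerge1_nil (cs : List Char) (d : Int) (gs : List (List Char)) :
    pvMerge1 [] cs d gs = gs := by simp [pvMerge1]

lemma pvMerge1_bump (cur : List Char) (cs : List Char) (d : Int) (gs : List (List Char))
    (h1 : cur ≠ []) (h2 : pvBumpFirst cs d = true) : pvMerge1 cur cs d gs = cur :: gs := by
  simp [pvMerge1, h1, h2]

lemma pvMerge1_cons (cur : List Char) (c : Char) (cs : List Char) (d : Int)
    (x : List Char) (gs : List (List Char)) (hb : pvBumpFirst (c :: cs) d = false) :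
    pvMerge1 cur (c :: cs) d (x :: gs) = (cur ++ x) :: gs := by
  by_cases hc : cur = []
  · subst hc; simp [pvMerge1, pvConsMerge]
  · simp [pvMerge1, hc, hb, pvConsMerge]

lemma pvMerge1_snoc (cur : List Char) (c : Char) (cs : List Char) (d : Int) (G : List (List Char)) :
    pvConsMerge cur (pvMerge1 [c] cs d G) = pvMerge1 (cur ++ [c]) cs d G := by
  simp only [pvMerge1]
  split_ifs <;> cases G <;> simp_all [pvConsMerge]

lemma pvMerge1_glue (cur : List Char) (c : Char) (cs : List Char) (d d' : Int) (G : List (List Char))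
    (hb : pvBumpFirst (c :: cs) d = false) :
    pvMerge1 cur (c :: cs) d (pvMerge1 [c] cs d' G) = pvMerge1 (cur ++ [c]) cs d' G := by
  by_cases hc : cur = []
  · subst hc; simp [pvMerge1_nil]
  · rw [← pvMerge1_snoc]
    simp [pvMerge1, hc, hb]

lemma pvLemB (cs : List Char) : ∀ (cur : List Char) (d : Int) (brk nonempty : Bool) (t : Int),
    (cur ≠ [] → brk = false ∧ nonempty = true) →
    (pvMerge1 cur cs d (pvGroups (pvPass1 cs nonempty t d brk))).map pvFlag = pvF cs cur d := by
  induction cs with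
  | nil =>
    intro cur d brk ne _ _
    by_cases hc : cur = []
    · subst hc; simp [pvPass1, pvGroups, pvMerge1, pvF]
    · simp [pvPass1, pvGroups, pvMerge1, hc, pvBumpFirst, pvConsMerge, pvF]
  | cons c cs ih =>
    intro cur d brk ne t h
    simp only [pvPass1]
    by_cases hpo : c = '('
    · subst hpo
      simp only [show (('(' : Char) == '(') = true from rfl,
        show (('(' : Char) == ')') = false from rfl, Bool.true_and, Bool.false_and,
        if_true, Bool.false_eq_true, if_false]
      by_cases hflush : cur ≠ [] ∧ d = 0
      · -- branch 1: '(' at depth 0 with a pending token: flush it, start a new group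
        obtain ⟨hbrk, hne⟩ := h hflush.1
        subst hbrk hne
        have hbump : pvBumpFirst ('(' :: cs) d = true := by
          simp [pvBumpFirst, hflush.2]
        rw [pvKeyF, pvMerge1_bump _ _ _ _ hflush.1 hbump, List.map_cons,
          ih ['('] (d + 1) false true _ (fun _ => ⟨rfl, rfl⟩)]
        simp [pvF, hflush.1, hflush.2]
      · by_cases hc : cur = []
        · -- branch 2a: no pending token; '(' starts the current group
          subst hc
          rw [pvKeyF, pvMerge1_nil, ih ['('] (d + 1) false true _ (fun _ => ⟨rfl, rfl⟩)]
          simp [pvF]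
        · -- branch 2b: '(' at nonzero depth joins the current group
          have hd : ¬ d = 0 := fun hd => hflush ⟨hc, hd⟩
          have hb : pvBumpFirst ('(' :: cs) d = false := by
            simp [pvBumpFirst, hd]
          rw [pvKeyF, pvMerge1_glue _ _ _ _ _ _ hb,
            ih (cur ++ ['(']) (d + 1) false true _ (fun _ => ⟨rfl, rfl⟩)]
          simp [pvF, hflush]
    · have hco : (c == '(') = false := by simpa using hpo
      have hb : pvBumpFirst (c :: cs) d = false := by simp [pvBumpFirst, hco]
      by_cases hpc : c = ')'
      · subst hpc
        simp only [show ((')' : Char) == '(') = false from rfl,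
          show ((')' : Char) == ')') = true from rfl, Bool.true_and, Bool.false_and,
          Bool.false_eq_true, if_false, if_true]
        by_cases hd1 : d - 1 = 0
        · -- branch 3: ')' closes to depth 0, finishing the group
          have e1 : ((d - 1 : Int) == 0) = true := by simpa using hd1
          simp only [e1, if_true]
          rw [pvKeyT, pvMerge1_cons _ _ _ _ _ _ hb, List.map_cons]
          have ih' : ∀ t' : Int, List.map pvFlag (pvGroups (pvPass1 cs true t' (d - 1) true)) = pvF cs [] (d - 1) := by
            intro t'
            have := ih [] (d - 1) true true t' (fun hh => absurd rfl hh)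
            rwa [pvMerge1_nil] at this
          rw [ih' _]
          simp [pvF, hd1]
        · -- branch 4: ')' at other depths joins the current group
          have e1 : ((d - 1 : Int) == 0) = false := by simpa using hd1
          simp only [e1, Bool.false_eq_true, if_false]
          rw [pvKeyF, pvMerge1_glue _ _ _ _ _ _ hb,
            ih (cur ++ [')']) (d - 1) false true _ (fun _ => ⟨rfl, rfl⟩)]
          simp [pvF, hd1]
      · -- branch 5: ordinary character joins the current group
        have hcc : (c == ')') = false := by simpa using hpc
        simp only [hco, hcc, Bool.false_and, Bool.false_eq_true, if_false]
        rw [pvKeyF, pvMerge1_glue _ _ _ _ _ _ hb,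
          ih (cur ++ [c]) d false true _ (fun _ => ⟨rfl, rfl⟩)]
        simp [pvF, hpo, hpc]


lemma pvHead_snoc (cur : List Char) (x : Char) (h : cur ≠ []) :
    (cur ++ [x]).head? = cur.head? := by cases cur <;> simp_all

lemma pvStepA_open_flush (tokens : List (String × Bool)) (cur : List Char) (d : Int)
    (h : cur ≠ [] ∧ d = 0) :
    pvStepA (tokens, cur, d) '(' = (tokens ++ [(String.mk cur, false)], ['('], d + 1) := by
  simp [pvStepA, h]

lemma pvStepA_open (tokens : List (String × Bool)) (cur : List Char) (d : Int)
    (h : ¬(cur ≠ [] ∧ d = 0)) :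
    pvStepA (tokens, cur, d) '(' = (tokens, cur ++ ['('], d + 1) := by
  simp [pvStepA, h]

lemma pvStepA_close_flush (tokens : List (String × Bool)) (cur : List Char) (d : Int)
    (h : d - 1 = 0) :
    pvStepA (tokens, cur, d) ')' = (tokens ++ [(String.mk (cur ++ [')']), true)], [], d - 1) := by
  simp [pvStepA, h]

lemma pvStepA_close (tokens : List (String × Bool)) (cur : List Char) (d : Int)
    (h : ¬(d - 1 = 0)) :
    pvStepA (tokens, cur, d) ')' = (tokens, cur ++ [')'], d - 1) := by
  simp [pvStepA, h]

lemma pvStepA_other (tokens : List (String × Bool)) (cur : List Char) (d : Int) (c : Char)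
    (h1 : ¬ c = '(') (h2 : ¬ c = ')') :
    pvStepA (tokens, cur, d) c = (tokens, cur ++ [c], d) := by
  simp [pvStepA, h1, h2]

def pvFinA (r : List (String × Bool) × List Char × Int) : List (String × Bool) :=
  r.1 ++ (if r.2.1 ≠ [] then [(String.mk r.2.1, decide (0 < r.2.2))] else [])

lemma pvLemA (cs : List Char) : ∀ (tokens : List (String × Bool)) (cur : List Char) (d : Int),
    (cur = [] → d = 0) → (cur ≠ [] → ((0 < d) ↔ cur.head? = some '(')) →
    pvFinA (cs.foldl pvStepA (tokens, cur, d)) = tokens ++ pvF cs cur d := by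
  induction cs with
  | nil =>
    intro tokens cur d h1 h2
    by_cases hc : cur = []
    · subst hc; simp [pvF, pvFinA]
    · have hiff := h2 hc
      simp [pvFinA, pvF, hc, pvFlag, decide_eq_decide.mpr hiff]
  | cons c cs ih =>
    intro tokens cur d h1 h2
    simp only [List.foldl_cons]
    by_cases hpo : c = '('
    · subst hpo
      by_cases hflush : cur ≠ [] ∧ d = 0
      · have hP : cur.head? ≠ some '(' := by
          intro hh
          have := (h2 hflush.1).mpr hh
          omega
        rw [pvStepA_open_flush _ _ _ hflush,
          ih (tokens ++ [(String.mk cur, false)]) ['('] (d + 1) (by simp) (by simp [hflush.2])]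
        have hfl : pvFlag cur = (String.mk cur, false) := by simp [pvFlag, hP]
        simp [pvF, hflush.1, hflush.2, hfl]
      · have h2' : (cur ++ ['(']) ≠ [] → ((0 < d + 1) ↔ (cur ++ ['(']).head? = some '(') := by
          intro _
          by_cases hc : cur = []
          · subst hc; simp [h1 rfl]
          · rw [pvHead_snoc _ _ hc]
            have hd : ¬ d = 0 := fun hd => hflush ⟨hc, hd⟩
            have hiff := h2 hc
            constructor
            · intro hlt
              by_contra hne
              have : ¬ 0 < d := fun hl => hne (hiff.mp hl)
              omega
            · intro hh
              have := hiff.mpr hh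
              omega
        rw [pvStepA_open _ _ _ hflush, ih tokens (cur ++ ['(']) (d + 1) (by simp) h2']
        simp [pvF, hflush]
    · by_cases hpc : c = ')'
      · subst hpc
        by_cases hd1 : d - 1 = 0
        · have hc : cur ≠ [] := by
            intro hc
            have := h1 hc
            omega
          have hP : cur.head? = some '(' := (h2 hc).mp (by omega)
          rw [pvStepA_close_flush _ _ _ hd1,
            ih (tokens ++ [(String.mk (cur ++ [')']), true)]) [] (d - 1) (fun _ => hd1) (by simp)]
          have hfl : pvFlag (cur ++ [')']) = (String.mk (cur ++ [')']), true) := by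
            simp [pvFlag, pvHead_snoc _ _ hc, hP]
          simp [pvF, hd1, hfl]
        · have h2' : (cur ++ [')']) ≠ [] → ((0 < d - 1) ↔ (cur ++ [')']).head? = some '(') := by
            intro _
            by_cases hc : cur = []
            · subst hc
              have := h1 rfl
              simp [this]
            · rw [pvHead_snoc _ _ hc]
              have hiff := h2 hc
              constructor
              · intro hlt
                exact hiff.mp (by omega)
              · intro hh
                have := hiff.mpr hh
                omega
          rw [pvStepA_close _ _ _ hd1, ih tokens (cur ++ [')']) (d - 1) (by simp) h2']
          simp [pvF, hd1]
      · have h2' : (cur ++ [c]) ≠ [] → ((0 < d) ↔ (cur ++ [c]).head? = some '(') := by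
          intro _
          by_cases hc : cur = []
          · subst hc
            have := h1 rfl
            simp [this, hpo]
          · rw [pvHead_snoc _ _ hc]
            exact h2 hc
        rw [pvStepA_other _ _ _ _ hpo hpc, ih tokens (cur ++ [c]) d (by simp) h2']
        simp [pvF, hpo, hpc]

-- ===== VERDICT (by name: the statement is the Claim_ definition above) =====
theorem tokenize_with_parens_spec : Claim_equal_tokenize_with_parens := by
  intro text _
  unfold Spec_tokenize_with_parens
  have hA := pvLemA text.toList [] [] 0 (fun _ => rfl) (fun h => absurd rfl h)
  have hB := pvLemB text.toList [] 0 false false 0 (fun h => absurd rfl h)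
  rw [pvMerge1_nil] at hB
  simp only [List.nil_append] at hA
  have hport : tokenize_with_parens text = pvFinA (text.toList.foldl pvStepA ([], [], 0)) := rfl
  rw [hport, hA, ← hB]
  rfl
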